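-- pv_equiv track=rewrite | github.com/shmilee/gdpy3 | src/utils.py | simple_parse_doc
-- ===== SOURCE A (Python) =====
-- def simple_parse_doc(doc, sections=(), strip=None, **kwargs):
--     '''
--     Extract the docstring text from the ordered sections.
--     Return a dict of sections.
--
--     Parameters
--     ----------
--     doc: str, docstring
--     sections: tuple of ordered sections
--     strip: str or None.
--         If strip is None, remove leading and trailing whitespace in sections.
--         Else, remove characters in strip instead.
--     kwargs: other unexpected parameters
--
--     Example
--     -------
--     .. code:: python
--
--         doc = ('\\n    summary\\n\\n    ABC\\n    ---\\n    abcdefg\\n'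
--                '\\n    HIJ\\n    ---\\n    hijklmn\\n    ')
--         sections = ('ABC', 'HIJ')
--         return_doc_sections = {
--             'ABC': '---\\n    abcdefg',
--             'HIJ': '---\\n    hijklmn'
--         }
--     '''
--     idxs = []
--     start = 0
--     for sect in sections:
--         idx = doc.find(sect + '\n', start)
--         if idx == -1:
--             idxs.append(None)
--         else:
--             start = idx + len(sect) + 1
--             idxs.append((idx, start))
--     zip_sections = [(sections[i], *idxs[i])
--                     for i in range(len(sections)) if idxs[i] is not None]
--     doc_sections = {}
--     for i, zip_sect in enumerate(zip_sections):
--         sect, idx, start = zip_sect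
--         if i == len(zip_sections) - 1:
--             doc_sect = doc[start:]
--         else:
--             idx_next = zip_sections[i+1][1]
--             doc_sect = doc[start:idx_next]
--         doc_sections[sect] = doc_sect.strip(strip)
--     return doc_sections
-- ===== SOURCE B (Python) =====
-- def simple_parse_doc(doc, sections=(), strip=None, **kwargs):
--     doc_sections = {}
--     pending = None  # (section, content_start)
--     start = 0
--     for sect in sections:
--         idx = doc.find(sect + '\n', start)
--         if idx == -1:
--             continue
--         if pending is not None:
--             doc_sections[pending[0]] = doc[pending[1]:idx].strip(strip)
--         start = idx + len(sect) + 1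
--         pending = (sect, start)
--     if pending is not None:
--         doc_sections[pending[0]] = doc[pending[1]:].strip(strip)
--     return doc_sections
-- ===== Notes on version B (the rewrite author's own statement) =====
-- stated objective: alternative
-- what changed: Replaces A's three-pass structure (scan all sections into an index list, build a filtered zip list, then a second loop with index lookahead) by a single forward pass that remembers the last found section and closes it when the next header is found or at end of input.
import Mathlib
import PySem

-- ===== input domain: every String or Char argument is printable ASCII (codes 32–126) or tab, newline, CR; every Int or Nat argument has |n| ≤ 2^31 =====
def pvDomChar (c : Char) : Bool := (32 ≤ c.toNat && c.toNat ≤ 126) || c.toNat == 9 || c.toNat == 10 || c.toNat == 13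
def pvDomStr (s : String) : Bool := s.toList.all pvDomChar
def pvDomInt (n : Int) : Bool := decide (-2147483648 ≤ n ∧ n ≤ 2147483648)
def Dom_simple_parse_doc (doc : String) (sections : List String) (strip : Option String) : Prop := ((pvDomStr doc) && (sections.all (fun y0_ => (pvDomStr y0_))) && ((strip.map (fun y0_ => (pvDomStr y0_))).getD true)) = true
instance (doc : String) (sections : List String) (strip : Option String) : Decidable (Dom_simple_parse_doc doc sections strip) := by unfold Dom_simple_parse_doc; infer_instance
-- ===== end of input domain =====

-- B replaces A's three passes (scan, filtered zip, lookahead loop) by one forward pass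
-- with a 'pending' section; return values are proved equal, no side effects involved.

-- shared helper: Python's s.strip(strip) (None → whitespace strip, else strip those chars)
def pyStrip (strip : Option String) (s : List Char) : List Char :=
  match strip with
  | none => PySem.Chars.strip s
  | some cs => PySem.Chars.stripChars s cs.toList

-- ===== PORT A =====
-- first loop of A: state (start, idxs)
def pvScanStep (docL : List Char) (st : Int × List (Option (Int × Int))) (sect : String) :
    Int × List (Option (Int × Int)) :=
  let idx := PySem.Chars.findFrom docL (sect.toList ++ ['\n']) st.1 none
  if idx = -1 then (st.1, st.2 ++ [none])
  else (idx + PySem.Chars.len sect.toList + 1,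
        st.2 ++ [some (idx, idx + PySem.Chars.len sect.toList + 1)])

def simple_parse_doc (doc : String) (sections : List String) (strip : Option String) : List (String × String) :=
  let docL := doc.toList
  let scan := sections.foldl (pvScanStep docL) ((0 : Int), ([] : List (Option (Int × Int))))
  let idxs := scan.2
  -- zip_sections: the comprehension pairing each section with its found indices, dropping None
  let zip_sections := (sections.zip idxs).foldl
    (fun acc p =>
      match p.2 with
      | none => acc
      | some q => acc ++ [(p.1, q.1, q.2)]) []
  let n := zip_sections.length
  -- second loop: enumerate with last-index test and lookahead into zip_sections[i+1]
  (PySem.List.enumerate zip_sections 0).foldl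
    (fun (d : PySem.Dict String String) iz =>
      let doc_sect :=
        if iz.1 = (n : Int) - 1 then PySem.Chars.slice docL (some iz.2.2.2) none
        else
          let nxt := PySem.List.pyGetD zip_sections (iz.1 + 1) ("", 0, 0)
          PySem.Chars.slice docL (some iz.2.2.2) (some nxt.2.1)
      d.insert iz.2.1 (String.ofList (pyStrip strip doc_sect)))
    PySem.Dict.empty |>.items

-- ===== PORT B =====
-- single pass: 'pending' holds the last found section and its content start;
-- it is closed when the next section header is found, or after the loop.
def pvLoopB (docL : List Char) (strip : Option String) :
    List String → Int → Option (String × Int) → PySem.Dict String String → PySem.Dict String String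
  | [], _, pending, d =>
      match pending with
      | none => d
      | some (s, c) =>
          d.insert s (String.ofList (pyStrip strip (PySem.Chars.slice docL (some c) none)))
  | sect :: rest, start, pending, d =>
      let idx := PySem.Chars.findFrom docL (sect.toList ++ ['\n']) start none
      if idx = -1 then pvLoopB docL strip rest start pending d
      else
        let d' :=
          match pending with
          | none => d
          | some (s, c) =>
              d.insert s (String.ofList (pyStrip strip (PySem.Chars.slice docL (some c) (some idx))))
        pvLoopB docL strip rest (idx + PySem.Chars.len sect.toList + 1)
          (some (sect, idx + PySem.Chars.len sect.toList + 1)) d'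

def simple_parse_doc_alt (doc : String) (sections : List String) (strip : Option String) : List (String × String) :=
  (pvLoopB doc.toList strip sections 0 none PySem.Dict.empty).items

-- ===== PRECONDITION & SPEC =====
def Spec_simple_parse_doc (doc : String) (sections : List String) (strip : Option String) (out : List (String × String)) : Prop := out = simple_parse_doc_alt doc sections strip
instance (doc : String) (sections : List String) (strip : Option String) (out : List (String × String)) : Decidable (Spec_simple_parse_doc doc sections strip out) := by unfold Spec_simple_parse_doc; infer_instance

-- ===== CLAIM (what is proved, stated in full; the proofs are below) =====
def Claim_equal_simple_parse_doc : Prop := ∀ (doc : String) (sections : List String) (strip : Option String), Dom_simple_parse_doc doc sections strip → Spec_simple_parse_doc doc sections strip (simple_parse_doc doc sections strip)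

-- ===== LEMMAS AND PROOFS =====

-- the list of found sections with their header index and content start
def pvFound (docL : List Char) : List String → Int → List (String × Int × Int)
  | [], _ => []
  | sect :: rest, start =>
      let idx := PySem.Chars.findFrom docL (sect.toList ++ ['\n']) start none
      if idx = -1 then pvFound docL rest start
      else (sect, idx, idx + PySem.Chars.len sect.toList + 1) ::
            pvFound docL rest (idx + PySem.Chars.len sect.toList + 1)

-- common evaluation of the found list into the dict
def pvEmit (docL : List Char) (strip : Option String) (d : PySem.Dict String String) :
    List (String × Int × Int) → PySem.Dict String String
  | [] => d
  | [(s, _, c)] =>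
      d.insert s (String.ofList (pyStrip strip (PySem.Chars.slice docL (some c) none)))
  | (s, _, c) :: (s2, i2, c2) :: rest =>
      pvEmit docL strip
        (d.insert s (String.ofList (pyStrip strip (PySem.Chars.slice docL (some c) (some i2)))))
        ((s2, i2, c2) :: rest)

-- the recursive contents of A's idxs list
def pvIdxs (docL : List Char) : List String → Int → List (Option (Int × Int))
  | [], _ => []
  | sect :: rest, start =>
      let idx := PySem.Chars.findFrom docL (sect.toList ++ ['\n']) start none
      if idx = -1 then none :: pvIdxs docL rest start
      else some (idx, idx + PySem.Chars.len sect.toList + 1) ::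
            pvIdxs docL rest (idx + PySem.Chars.len sect.toList + 1)

theorem pvScan_snd (docL : List Char) (sects : List String) :
    ∀ (start : Int) (acc : List (Option (Int × Int))),
      (sects.foldl (pvScanStep docL) (start, acc)).2 = acc ++ pvIdxs docL sects start := by
  induction sects with
  | nil => intro start acc; simp [pvIdxs]
  | cons sect rest ih =>
      intro start acc
      simp only [List.foldl_cons, pvScanStep, pvIdxs]
      split_ifs with h <;> simp [ih]

theorem pvZip_eq_found (docL : List Char) (sects : List String) :
    ∀ (start : Int) (acc : List (String × Int × Int)),
      (sects.zip (pvIdxs docL sects start)).foldl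
        (fun acc p =>
          match p.2 with
          | none => acc
          | some q => acc ++ [(p.1, q.1, q.2)]) acc
      = acc ++ pvFound docL sects start := by
  induction sects with
  | nil => intro start acc; simp [pvIdxs, pvFound]
  | cons sect rest ih =>
      intro start acc
      simp only [pvIdxs, pvFound]
      split_ifs with h
      · rw [List.zip_cons_cons, List.foldl_cons]
        exact ih start acc
      · rw [List.zip_cons_cons, List.foldl_cons]
        rw [ih]
        simp

-- A's second loop, folded over a suffix of the full zip list, equals pvEmit on that suffix
theorem pvLoop2_eq_emit (docL : List Char) (strip : Option String)
    (zs : List (String × Int × Int)) :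
    ∀ (suf : List (String × Int × Int)) (k : Nat) (d : PySem.Dict String String),
      zs.drop k = suf →
      (PySem.List.enumerate suf (k : Int)).foldl
        (fun (d : PySem.Dict String String) iz =>
          let doc_sect :=
            if iz.1 = (zs.length : Int) - 1 then PySem.Chars.slice docL (some iz.2.2.2) none
            else
              let nxt := PySem.List.pyGetD zs (iz.1 + 1) ("", 0, 0)
              PySem.Chars.slice docL (some iz.2.2.2) (some nxt.2.1)
          d.insert iz.2.1 (String.ofList (pyStrip strip doc_sect))) d
      = pvEmit docL strip d suf := by
  intro suf
  induction suf with
  | nil => intro k d _; simp [pvEmit]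
  | cons z rest ih =>
      intro k d hk
      have hklt : k < zs.length := by
        by_contra h
        simp [List.drop_eq_nil_of_le (Nat.le_of_not_lt h)] at hk
      have hlen : zs.length = k + rest.length + 1 := by
        have := congrArg List.length hk
        simp at this; omega
      have hdrop : zs.drop (k + 1) = rest := by
        have : zs.drop (k+1) = (zs.drop k).drop 1 := by
          rw [List.drop_drop]
        simp [this, hk]
      rw [PySem.List.enumerate_cons]
      simp only [List.foldl_cons]
      cases rest with
      | nil =>
          have hlast : (k : Int) = (zs.length : Int) - 1 := by
            simp at hlen; omega
          obtain ⟨s, i, c⟩ := z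
          simp only [hlast, pvEmit]
          have h3 := ih (k + 1) (d.insert s (String.ofList (pyStrip strip (PySem.Chars.slice docL (some c) none)))) hdrop
          simpa using h3
      | cons z2 rest2 =>
          have hne : ¬ ((k : Int) = (zs.length : Int) - 1) := by
            simp at hlen ⊢; omega
          have h1 : zs[k+1]? = some z2 := by
            have h2 : (List.drop (k+1) zs)[0]? = zs[k+1+0]? := List.getElem?_drop
            rw [hdrop] at h2
            simpa using h2.symm
          have hnxt : PySem.List.pyGetD zs ((k : Int) + 1) ("", 0, 0) = z2 := by
            have hc : ((k : Int) + 1) = ((k + 1 : Nat) : Int) := by push_cast; ring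
            rw [hc, PySem.List.pyGetD_natCast]
            simp [List.getD, h1]
          obtain ⟨s, i, c⟩ := z
          obtain ⟨s2, i2, c2⟩ := z2
          have hrec := ih (k + 1)
            (d.insert s (String.ofList (pyStrip strip (PySem.Chars.slice docL (some c) (some i2)))))
            hdrop
          push_cast at hrec
          simp only [if_neg hne, hnxt, pvEmit]
          simpa using hrec

-- pvEmit never reads the header index of the FIRST element
theorem pvEmit_head_mid (docL : List Char) (strip : Option String)
    (d : PySem.Dict String String) (l : List (String × Int × Int))
    (s : String) (i i' c : Int) :
    pvEmit docL strip d ((s, i, c) :: l) = pvEmit docL strip d ((s, i', c) :: l) := by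
  cases l with
  | nil => rfl
  | cons z2 rest => obtain ⟨s2, i2, c2⟩ := z2; rfl

-- B's loop equals pvEmit over the found list (with the pending section prepended)
theorem pvLoopB_eq_emit (docL : List Char) (strip : Option String) (sects : List String) :
    ∀ (start : Int) (d : PySem.Dict String String),
      (pvLoopB docL strip sects start none d = pvEmit docL strip d (pvFound docL sects start)) ∧
      (∀ (s : String) (c : Int),
        pvLoopB docL strip sects start (some (s, c)) d
          = pvEmit docL strip d ((s, 0, c) :: pvFound docL sects start)) := by
  induction sects with
  | nil =>
      intro start d
      constructor
      · simp [pvLoopB, pvFound, pvEmit]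
      · intro s c; simp [pvLoopB, pvFound, pvEmit]
  | cons sect rest ih =>
      intro start d
      constructor
      · simp only [pvLoopB, pvFound]
        split_ifs with h
        · exact (ih start d).1
        · rw [pvEmit_head_mid docL strip d _ sect _ 0 _]
          exact (ih _ d).2 sect _
      · intro s c
        simp only [pvLoopB, pvFound]
        split_ifs with h
        · exact (ih start d).2 s c
        · have hfix : ∀ rest' i2 c2,
              pvEmit docL strip d ((s, 0, c) :: (sect, i2, c2) :: rest')
                = pvEmit docL strip
                    (d.insert s (String.ofList (pyStrip strip (PySem.Chars.slice docL (some c) (some i2)))))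
                    ((sect, i2, c2) :: rest') := fun _ _ _ => rfl
          rw [hfix]
          rw [pvEmit_head_mid docL strip _ _ sect _ 0 _]
          exact (ih _ _).2 sect _

-- ===== VERDICT (by name: the statement is the Claim_ definition above) =====
theorem simple_parse_doc_spec : Claim_equal_simple_parse_doc := by
  intro doc sections strip _
  show simple_parse_doc doc sections strip = simple_parse_doc_alt doc sections strip
  unfold simple_parse_doc simple_parse_doc_alt
  dsimp only
  rw [pvScan_snd doc.toList sections 0 []]
  simp only [List.nil_append]
  rw [pvZip_eq_found doc.toList sections 0 []]
  simp only [List.nil_append]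
  rw [(pvLoopB_eq_emit doc.toList strip sections 0 PySem.Dict.empty).1]
  congr 1
  exact pvLoop2_eq_emit doc.toList strip (pvFound doc.toList sections 0)
    (pvFound doc.toList sections 0) 0 PySem.Dict.empty (by simp)
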